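-- pv_equiv track=rewrite | github.com/damoncui1993/wiz-mcp | scripts/note_fixer.py | fix_markdown_code_block
-- ===== SOURCE A (Python) =====
-- def fix_markdown_code_block(content: str) -> str:
--     """修复代码块多余的空行"""
--     line_num = 0
--     code_block = False
--     fix_content = []
--     lines = content.split('\n')
--     for line in lines:
--         if line.startswith('```'):
--             code_block = not code_block
--             line_num = 0
--         if code_block:
--             line_num += 1
--             if line_num % 2 == 0:
--                 if line.isspace() or len(line) == 0:
--                     continue
--         fix_content.append(line)
--     return '\n'.join(fix_content)
-- ===== SOURCE B (Python) =====
-- def fix_markdown_code_block(content: str) -> str: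
--     """修复代码块多余的空行 — segment-based rewrite: split at fence lines, filter code segments."""
--     segments = []
--     cur = []
--     for line in content.split('\n'):
--         if line.startswith('```'):
--             segments.append(cur)
--             cur = [line]
--         else:
--             cur.append(line)
--     segments.append(cur)
--     out = []
--     for i, seg in enumerate(segments):
--         if i % 2 == 1:
--             for j, line in enumerate(seg, 1):
--                 if j % 2 == 0 and (line.isspace() or len(line) == 0):
--                     continue
--                 out.append(line)
--         else:
--             out.extend(seg)
--     return '\n'.join(out)
-- ===== Notes on version B (the rewrite author's own statement) =====
-- stated objective: alternative
-- what changed: Replaces A's single stateful loop (code-block toggle plus resettable line counter) by a two-phase decomposition: first split the lines into fence-delimited segments (each '```' line opens the segment it belongs to), then drop blank lines at even 1-based positions inside odd-indexed (code) segments and rejoin.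
import Mathlib
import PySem

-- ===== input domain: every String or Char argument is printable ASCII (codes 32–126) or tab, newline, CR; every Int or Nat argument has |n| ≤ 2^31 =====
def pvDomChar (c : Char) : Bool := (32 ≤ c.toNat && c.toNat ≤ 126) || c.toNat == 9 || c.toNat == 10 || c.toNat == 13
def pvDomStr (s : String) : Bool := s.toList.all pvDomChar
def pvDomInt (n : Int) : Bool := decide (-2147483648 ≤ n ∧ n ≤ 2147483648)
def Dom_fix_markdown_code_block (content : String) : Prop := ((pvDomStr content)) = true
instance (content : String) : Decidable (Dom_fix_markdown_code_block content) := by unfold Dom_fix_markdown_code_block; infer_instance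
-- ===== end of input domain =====

-- B replaces A's single stateful toggle/counter loop by a two-phase decomposition
-- (split the lines into fence-delimited segments, then filter blank even-indexed lines
-- out of odd-numbered segments); same cost, different structure (objective: alternative).

-- ===== PORT A =====
def pvStepA (st : Int × Bool × List String) (line : String) : Int × Bool × List String :=
  let code_block := if PySem.Str.startswith line "```" then !st.2.1 else st.2.1
  let line_num := if PySem.Str.startswith line "```" then 0 else st.1
  if code_block then
    let line_num := line_num + 1
    if PySem.Int.mod line_num 2 == 0 && (PySem.Str.strIsspace line || PySem.Str.len line == 0) then
      (line_num, code_block, st.2.2)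
    else (line_num, code_block, st.2.2 ++ [line])
  else (line_num, code_block, st.2.2 ++ [line])

def fix_markdown_code_block (content : String) : String :=
  let lines := (PySem.Str.split? content "\n").getD []
  let st := lines.foldl pvStepA (0, false, [])
  PySem.Str.join "\n" st.2.2

-- ===== PORT B =====
-- phase 2 inner loop: `for j, line in enumerate(seg, 1)`
def pvProcSeg : Nat → List String → List String
  | _, [] => []
  | j, line :: rest =>
    if j % 2 == 0 && (PySem.Str.strIsspace line || PySem.Str.len line == 0) then
      pvProcSeg (j + 1) rest
    else line :: pvProcSeg (j + 1) rest

-- phase 2 outer loop: `for i, seg in enumerate(segments)`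
def pvRenderSegs : Nat → List (List String) → List String
  | _, [] => []
  | i, seg :: rest =>
    (if i % 2 == 1 then pvProcSeg 1 seg else seg) ++ pvRenderSegs (i + 1) rest

-- phase 1 loop body: split at fence lines, a fence opens a new segment
def pvStepB (st : List (List String) × List String) (line : String) :
    List (List String) × List String :=
  if PySem.Str.startswith line "```" then (st.1 ++ [st.2], [line]) else (st.1, st.2 ++ [line])

def fix_markdown_code_block_alt (content : String) : String :=
  let p := ((PySem.Str.split? content "\n").getD []).foldl pvStepB ([], [])
  PySem.Str.join "\n" (pvRenderSegs 0 (p.1 ++ [p.2]))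

-- ===== PRECONDITION & SPEC =====
def Spec_fix_markdown_code_block (content : String) (out : String) : Prop := out = fix_markdown_code_block_alt content
instance (content : String) (out : String) : Decidable (Spec_fix_markdown_code_block content out) := by unfold Spec_fix_markdown_code_block; infer_instance

-- ===== CLAIM (what is proved, stated in full; the proofs are below) =====
def Claim_equal_fix_markdown_code_block : Prop := ∀ (content : String), Dom_fix_markdown_code_block content → Spec_fix_markdown_code_block content (fix_markdown_code_block content)

-- ===== LEMMAS AND PROOFS =====

-- common intermediate: the list of surviving lines, as a direct recursion
def pvChug : List String → Bool → Int → List String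
  | [], _, _ => []
  | l :: ls, cb, n =>
    let cb' := if PySem.Str.startswith l "```" then !cb else cb
    let n0 : Int := if PySem.Str.startswith l "```" then 0 else n
    if cb' then
      if PySem.Int.mod (n0 + 1) 2 == 0 && (PySem.Str.strIsspace l || PySem.Str.len l == 0) then
        pvChug ls cb' (n0 + 1)
      else l :: pvChug ls cb' (n0 + 1)
    else l :: pvChug ls cb' n0

theorem pvChug_cons_fence (l : String) (ls : List String) (cb : Bool) (n : Int)
    (hb : PySem.Str.startswith l "```" = true) :
    pvChug (l :: ls) cb n =
      if !cb then
        if PySem.Int.mod 1 2 == 0 && (PySem.Str.strIsspace l || PySem.Str.len l == 0) then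
          pvChug ls (!cb) 1
        else l :: pvChug ls (!cb) 1
      else l :: pvChug ls (!cb) 0 := by
  simp only [pvChug, hb, if_true]
  norm_num

theorem pvChug_cons_plain (l : String) (ls : List String) (cb : Bool) (n : Int)
    (hb : ¬ PySem.Str.startswith l "```" = true) :
    pvChug (l :: ls) cb n =
      if cb then
        if PySem.Int.mod (n + 1) 2 == 0 && (PySem.Str.strIsspace l || PySem.Str.len l == 0) then
          pvChug ls cb (n + 1)
        else l :: pvChug ls cb (n + 1)
      else l :: pvChug ls cb n := by
  simp only [pvChug, hb]
  norm_num

theorem pvStepA_fence (st : Int × Bool × List String) (l : String)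
    (hb : PySem.Str.startswith l "```" = true) :
    pvStepA st l =
      if !st.2.1 then
        if PySem.Int.mod 1 2 == 0 && (PySem.Str.strIsspace l || PySem.Str.len l == 0) then
          (1, !st.2.1, st.2.2)
        else (1, !st.2.1, st.2.2 ++ [l])
      else (0, !st.2.1, st.2.2 ++ [l]) := by
  simp only [pvStepA, hb, if_true]
  norm_num

theorem pvStepA_plain (st : Int × Bool × List String) (l : String)
    (hb : ¬ PySem.Str.startswith l "```" = true) :
    pvStepA st l =
      if st.2.1 then
        if PySem.Int.mod (st.1 + 1) 2 == 0 && (PySem.Str.strIsspace l || PySem.Str.len l == 0) then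
          (st.1 + 1, st.2.1, st.2.2)
        else (st.1 + 1, st.2.1, st.2.2 ++ [l])
      else (st.1, st.2.1, st.2.2 ++ [l]) := by
  simp only [pvStepA, hb]
  norm_num

theorem pvFoldA_eq_chug (ls : List String) : ∀ (n : Int) (cb : Bool) (acc : List String),
    (List.foldl pvStepA (n, cb, acc) ls).2.2 = acc ++ pvChug ls cb n := by
  induction ls with
  | nil => intro n cb acc; simp [pvChug]
  | cons l ls ih =>
    intro n cb acc
    rw [List.foldl_cons]
    by_cases hb : PySem.Str.startswith l "```" = true
    · rw [pvStepA_fence _ _ hb, pvChug_cons_fence _ _ _ n hb]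
      cases cb <;> simp only [Bool.not_false, Bool.not_true, if_true] <;>
        split_ifs <;> simp [ih]
    · rw [pvStepA_plain _ _ hb, pvChug_cons_plain _ _ _ _ hb]
      cases cb <;> simp only [if_true] <;> split_ifs <;> simp [ih]

theorem pvChug_false_irrel (ls : List String) : ∀ (n m : Int),
    pvChug ls false n = pvChug ls false m := by
  induction ls with
  | nil => intros; rfl
  | cons l ls ih =>
    intro n m
    by_cases hb : PySem.Str.startswith l "```" = true
    · rw [pvChug_cons_fence _ _ _ n hb, pvChug_cons_fence _ _ _ m hb]
    · rw [pvChug_cons_plain _ _ _ n hb, pvChug_cons_plain _ _ _ m hb]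
      simp [ih n m]

theorem pvProcSeg_snoc (xs : List String) : ∀ (j : Nat) (l : String),
    pvProcSeg j (xs ++ [l]) = pvProcSeg j xs ++
      (if (j + xs.length) % 2 == 0 && (PySem.Str.strIsspace l || PySem.Str.len l == 0)
       then [] else [l]) := by
  induction xs with
  | nil =>
    intro j l
    simp only [List.nil_append, List.length_nil, Nat.add_zero, pvProcSeg]
    split_ifs <;> simp
  | cons x xs ih =>
    intro j l
    simp only [List.cons_append, pvProcSeg, ih]
    have h : j + 1 + xs.length = j + (x :: xs).length := by simp; omega
    rw [h]
    split_ifs <;> simp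

theorem pvRenderSegs_snoc (S : List (List String)) : ∀ (i : Nat) (s : List String),
    pvRenderSegs i (S ++ [s]) = pvRenderSegs i S ++
      (if (i + S.length) % 2 == 1 then pvProcSeg 1 s else s) := by
  induction S with
  | nil => intro i s; simp [pvRenderSegs]
  | cons t S ih =>
    intro i s
    simp only [List.cons_append, pvRenderSegs, ih]
    have h : i + 1 + S.length = i + (t :: S).length := by simp; omega
    rw [h, List.append_assoc]

theorem pvParityFlip (k : Nat) :
    (decide ((k + 1) % 2 = 1)) = !(decide (k % 2 = 1)) := by
  rcases Nat.mod_two_eq_zero_or_one k with h | h <;> simp [Nat.add_mod, h]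

theorem pvModCast (k : Nat) :
    (PySem.Int.mod ((k : Int) + 1) 2 == 0) = ((1 + k) % 2 == 0) := by
  cases hb : ((1 + k) % 2 == 0) <;> simp_all <;> omega

theorem pvModOne : (PySem.Int.mod 1 2 == 0) = false := by decide

theorem pvFoldB_eq_chug (ls : List String) : ∀ (segs : List (List String)) (cur : List String),
    pvRenderSegs 0 ((List.foldl pvStepB (segs, cur) ls).1 ++ [(List.foldl pvStepB (segs, cur) ls).2])
    = pvRenderSegs 0 (segs ++ [cur]) ++ pvChug ls (decide (segs.length % 2 = 1)) (cur.length : Int) := by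
  induction ls with
  | nil => intro segs cur; simp [pvChug]
  | cons l ls ih =>
    intro segs cur
    rw [List.foldl_cons]
    by_cases hb : PySem.Str.startswith l "```" = true
    · rw [show pvStepB (segs, cur) l = (segs ++ [cur], [l]) from by
        unfold pvStepB; rw [if_pos hb]]
      rw [ih (segs ++ [cur]) [l], pvRenderSegs_snoc (segs ++ [cur]) 0 [l],
        pvChug_cons_fence l ls _ _ hb]
      have hp : pvProcSeg 1 [l] = [l] := by simp [pvProcSeg]
      simp only [hp, ite_self, List.length_append, List.length_cons, List.length_nil,
        Nat.zero_add, pvModOne, Bool.false_and, Bool.false_eq_true, if_false,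
        Nat.cast_one, List.append_assoc, List.singleton_append]
      rw [pvParityFlip]
      by_cases hd : segs.length % 2 = 1 <;> simp [hd]
      rw [pvChug_false_irrel ls 1 0]
    · rw [show pvStepB (segs, cur) l = (segs, cur ++ [l]) from by
        unfold pvStepB; rw [if_neg hb]]
      rw [ih segs (cur ++ [l]), pvRenderSegs_snoc segs 0 (cur ++ [l]),
        pvRenderSegs_snoc segs 0 cur, pvProcSeg_snoc cur 1 l,
        pvChug_cons_plain l ls _ _ hb, pvModCast]
      have hc : ((cur ++ [l]).length : Int) = (cur.length : Int) + 1 := by simp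
      rw [hc]
      by_cases hd : segs.length % 2 = 1
      · simp only [hd, Nat.zero_add, decide_true, if_pos]
        split_ifs <;> simp_all [List.append_assoc]
      · simp only [hd, Nat.zero_add, decide_false]
        rw [pvChug_false_irrel ls ((cur.length : Int) + 1) (cur.length : Int)]
        simp [hd, List.append_assoc]

-- ===== VERDICT (by name: the statement is the Claim_ definition above) =====
theorem fix_markdown_code_block_spec : Claim_equal_fix_markdown_code_block := by
  intro content _
  unfold Spec_fix_markdown_code_block
  simp only [fix_markdown_code_block, fix_markdown_code_block_alt]
  rw [pvFoldA_eq_chug, pvFoldB_eq_chug]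
  simp [pvRenderSegs]
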